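-- pv_equiv track=rewrite | github.com/jrn3217/FTP_Obstacles | board.py | isfully0connected
-- ===== SOURCE A (Python) =====
-- from collections import deque
--
-- def isfully0connected(maze):
--     rows, cols = len(maze), len(maze[0])
--
--     # Find the first '0' to start BFS
--     start = None
--     for r in range(rows):
--         for c in range(cols):
--             if maze[r][c] == 0:
--                 start = (r, c)
--                 break
--         if start:
--             break
--
--     if not start:
--         # No valid '0' positions in the maze
--         return False
--
--     # Directions for movement: up, down, left, right
--     directions = [(-1, 0), (1, 0), (0, -1), (0, 1)]
--
--     visited = set()
--     queue = deque([start])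
--     visited.add(start)
--
--     while queue:
--         r, c = queue.popleft()
--
--         for dr, dc in directions:
--             nr, nc = r + dr, c + dc
--
--             if 0 <= nr < rows and 0 <= nc < cols and maze[nr][nc] == 0 and (nr, nc) not in visited:
--                 visited.add((nr, nc))
--                 queue.append((nr, nc))
--
--     # After BFS, check if all '0' positions were visited
--     for r in range(rows):
--         for c in range(cols):
--             if maze[r][c] == 0 and (r, c) not in visited:
--                 return False
--
--     return True
-- ===== SOURCE B (Python) =====
-- def isfully0connected(maze):
--     rows, cols = len(maze), len(maze[0])
--     zeros = [(r, c) for r in range(rows) for c in range(cols) if maze[r][c] == 0]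
--     if not zeros:
--         return False
--     zset = set(zeros)
--     visited = {zeros[0]}
--     for _ in range(len(zeros)):
--         visited = visited | {(r + dr, c + dc)
--                              for (r, c) in visited
--                              for dr, dc in ((-1, 0), (1, 0), (0, -1), (0, 1))
--                              if (r + dr, c + dc) in zset}
--     return zset <= visited
-- ===== Notes on version B (the rewrite author's own statement) =====
-- stated objective: alternative
-- what changed: Replaces A's queue-driven BFS from the first zero cell by a round-based fixpoint saturation: collect all zero cells once, then repeatedly (len(zeros) rounds) union the visited set with every zero neighbour of a visited cell, and finally test set inclusion of all zero cells.
-- outside the precondition, e.g. on isfully0connected([[0, 5, 0], [5, 5]]): A returns False, B raises IndexError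
import Mathlib
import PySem

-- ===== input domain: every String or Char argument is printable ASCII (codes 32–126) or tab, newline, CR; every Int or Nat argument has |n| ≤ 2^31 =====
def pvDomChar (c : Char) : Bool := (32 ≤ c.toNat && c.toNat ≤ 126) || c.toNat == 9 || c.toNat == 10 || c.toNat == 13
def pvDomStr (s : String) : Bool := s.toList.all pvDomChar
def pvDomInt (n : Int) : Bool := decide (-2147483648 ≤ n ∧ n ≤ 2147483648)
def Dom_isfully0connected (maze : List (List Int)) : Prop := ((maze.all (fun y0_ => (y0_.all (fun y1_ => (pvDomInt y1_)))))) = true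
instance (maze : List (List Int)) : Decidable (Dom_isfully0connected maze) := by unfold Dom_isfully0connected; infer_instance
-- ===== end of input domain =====

-- B replaces A's queue-driven BFS by a round-based fixpoint saturation over the set of zero
-- cells (no worklist: expand the visited set by all zero-neighbours, len(zeros) rounds, then
-- test set inclusion); objective: alternative (not faster).


-- shared by both ports: the direction table and the cell lookup maze[r][c]
-- (out-of-range reads use default 1 ≠ 0; Pre_ keeps every Python access in range)
def pvDirs : List (Int × Int) := [(-1, 0), (1, 0), (0, -1), (0, 1)]

def pvAt (maze : List (List Int)) (r c : Int) : Int :=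
  PySem.List.pyGetD (PySem.List.pyGetD maze r []) c 1

-- ===== PORT A =====
-- first-zero scan with the double break ('if start: break')
def pvFindStart (maze : List (List Int)) (rows cols : Int) : Option (Int × Int) :=
  (PySem.List.pyRange 0 rows 1).foldl (fun st r =>
    match st with
    | some _ => st
    | none =>
      (PySem.List.pyRange 0 cols 1).foldl (fun st2 c =>
        match st2 with
        | some _ => st2
        | none => if pvAt maze r c == 0 then some (r, c) else none) none) none

-- body of the inner 'for dr, dc in directions' loop: maybe mark + enqueue one neighbour
def pvVisitDir (maze : List (List Int)) (rows cols : Int) (rc : Int × Int)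
    (s : PySem.Set (Int × Int) × List (Int × Int)) (d : Int × Int) :
    PySem.Set (Int × Int) × List (Int × Int) :=
  if 0 ≤ rc.1 + d.1 ∧ rc.1 + d.1 < rows ∧ 0 ≤ rc.2 + d.2 ∧ rc.2 + d.2 < cols ∧
      pvAt maze (rc.1 + d.1) (rc.2 + d.2) == 0 ∧ (rc.1 + d.1, rc.2 + d.2) ∉ s.1 then
    (PySem.Set.add s.1 (rc.1 + d.1, rc.2 + d.2), s.2 ++ [(rc.1 + d.1, rc.2 + d.2)])
  else s

-- the 'while queue' loop (fuel: at most rows*cols cells are ever enqueued)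
def pvBFS (maze : List (List Int)) (rows cols : Int) :
    Nat → PySem.Set (Int × Int) → List (Int × Int) → PySem.Set (Int × Int)
  | _, visited, [] => visited
  | 0, visited, _ => visited
  | fuel + 1, visited, rc :: rest =>
    let s := pvDirs.foldl (pvVisitDir maze rows cols rc) (visited, rest)
    pvBFS maze rows cols fuel s.1 s.2

def isfully0connected (maze : List (List Int)) : Bool :=
  let rows : Int := maze.length
  let cols : Int := (PySem.List.pyGetD maze 0 []).length
  match pvFindStart maze rows cols with
  | none => false
  | some start =>
    let visited := pvBFS maze rows cols (rows * cols).toNat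
      (PySem.Set.add PySem.Set.empty start) [start]
    (PySem.List.pyRange 0 rows 1).all (fun r =>
      (PySem.List.pyRange 0 cols 1).all (fun c =>
        !(pvAt maze r c == 0 && !(PySem.Set.contains visited (r, c)))))

-- ===== PORT B =====
-- row-major list of all zero cells
def pvZeros (maze : List (List Int)) (rows cols : Int) : List (Int × Int) :=
  (PySem.List.pyRange 0 rows 1).flatMap (fun r =>
    (PySem.List.pyRange 0 cols 1).filterMap (fun c =>
      if pvAt maze r c == 0 then some (r, c) else none))

-- one saturation round: visited | {zero neighbours of visited}
def pvGrow (zset : PySem.Set (Int × Int)) (v : PySem.Set (Int × Int)) :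
    PySem.Set (Int × Int) :=
  PySem.Set.union v (v.flatMap (fun p =>
    pvDirs.filterMap (fun d =>
      if PySem.Set.contains zset (p.1 + d.1, p.2 + d.2)
      then some (p.1 + d.1, p.2 + d.2) else none)))

def isfully0connected_alt (maze : List (List Int)) : Bool :=
  let rows : Int := maze.length
  let cols : Int := (PySem.List.pyGetD maze 0 []).length
  let zeros := pvZeros maze rows cols
  match zeros with
  | [] => false
  | z0 :: _ =>
    let zset := PySem.Set.ofList zeros
    let visited := (List.range zeros.length).foldl (fun v _ => pvGrow zset v)
      (PySem.Set.add PySem.Set.empty z0)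
    PySem.Set.issubset zset visited

-- ===== PRECONDITION & SPEC =====
-- Pre_ excludes the empty maze (len(maze[0]) raises IndexError) and ragged mazes with a row
-- shorter than row 0, on which A's indexing usually raises IndexError (and very occasionally
-- returns False before reaching the missing cell) and B's full scan always raises.
def Pre_isfully0connected (maze : List (List Int)) : Prop :=
  maze ≠ [] ∧ ∀ row ∈ maze, (maze.headD []).length ≤ row.length
instance (maze : List (List Int)) : Decidable (Pre_isfully0connected maze) := by
  unfold Pre_isfully0connected; infer_instance

def pvWitness_isfully0connected : List (List Int) := [[0, 0], [1, 0]]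

def Spec_isfully0connected (maze : List (List Int)) (out : Bool) : Prop :=
  out = isfully0connected_alt maze
instance (maze : List (List Int)) (out : Bool) : Decidable (Spec_isfully0connected maze out) := by
  unfold Spec_isfully0connected; infer_instance

-- ===== CLAIM (what is proved, stated in full; the proofs are below) =====
def Claim_equal_isfully0connected : Prop :=
  ∀ (maze : List (List Int)), Dom_isfully0connected maze → Pre_isfully0connected maze →
    Spec_isfully0connected maze (isfully0connected maze)

-- ===== LEMMAS AND PROOFS =====

-- the step relation both traversals expand: q is a zero cell one move away from p
def pvStepRel (maze : List (List Int)) (rows cols : Int) (p q : Int × Int) : Prop :=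
  q ∈ pvZeros maze rows cols ∧ ∃ d ∈ pvDirs, q = (p.1 + d.1, p.2 + d.2)

def pvReach (maze : List (List Int)) (rows cols : Int) (z0 x : Int × Int) : Prop :=
  Relation.ReflTransGen (pvStepRel maze rows cols) z0 x

lemma pv_mem_zeros (maze : List (List Int)) (rows cols : Int) (x : Int × Int) :
    x ∈ pvZeros maze rows cols ↔
      (0 ≤ x.1 ∧ x.1 < rows) ∧ (0 ≤ x.2 ∧ x.2 < cols) ∧ pvAt maze x.1 x.2 = 0 := by
  simp only [pvZeros, List.mem_flatMap, List.mem_filterMap, PySem.List.mem_pyRange_one]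
  constructor
  · rintro ⟨r, hr, c, hc, hif⟩
    split at hif
    · rename_i hz
      cases hif
      simp only
      exact ⟨hr, hc, by simpa using hz⟩
    · cases hif
  · rintro ⟨h1, h2, h3⟩
    refine ⟨x.1, h1, x.2, h2, ?_⟩
    rw [if_pos (by simpa using h3)]

lemma pv_zeros_length_le (maze : List (List Int)) (rows cols : Int)
    (hr : 0 ≤ rows) (hc : 0 ≤ cols) :
    (pvZeros maze rows cols).length ≤ (rows * cols).toNat := by
  have hmul : (rows * cols).toNat = rows.toNat * cols.toNat := by
    calc (rows * cols).toNat = ((rows.toNat : Int) * (cols.toNat : Int)).toNat := by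
          rw [Int.toNat_of_nonneg hr, Int.toNat_of_nonneg hc]
      _ = rows.toNat * cols.toNat := by rw [← Nat.cast_mul, Int.toNat_natCast]
  rw [hmul, pvZeros, List.length_flatMap]
  have hb : ∀ x ∈ (PySem.List.pyRange 0 rows 1).map
      (fun r => ((PySem.List.pyRange 0 cols 1).filterMap (fun c =>
        if pvAt maze r c == 0 then some (r, c) else none)).length), x ≤ cols.toNat := by
    intro x hx
    obtain ⟨r, _, rfl⟩ := List.mem_map.mp hx
    calc _ ≤ (PySem.List.pyRange 0 cols 1).length := List.length_filterMap_le _ _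
      _ = cols.toNat := by rw [PySem.List.length_pyRange_one]; omega
  calc _ ≤ _ • cols.toNat := List.sum_le_card_nsmul _ _ hb
    _ ≤ rows.toNat * cols.toNat := by
        simp only [List.length_map, PySem.List.length_pyRange_one, smul_eq_mul, sub_zero]
        omega

lemma pv_nodup_length_le {α : Type} (l Z : List α) (h1 : l.Nodup) (hs : l ⊆ Z) :
    l.length ≤ Z.length := by
  classical
  calc l.length = l.toFinset.card := (List.toFinset_card_of_nodup h1).symm
    _ ≤ Z.toFinset.card := Finset.card_le_card (by intro x hx; simp at hx ⊢; exact hs hx)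
    _ ≤ Z.length := Z.toFinset_card_le

lemma pv_sublist_lt {α : Type} {A B : List α} (h : List.Sublist A B) (x : α)
    (hxB : x ∈ B) (hxA : x ∉ A) : A.length + 1 ≤ B.length := by
  rcases Nat.lt_or_ge A.length B.length with h1 | h1
  · omega
  · have := h.eq_of_length_le h1; subst this; exact absurd hxB hxA

-- the count of still-unvisited zero cells
def pvUnvis (Z : List (Int × Int)) (v : PySem.Set (Int × Int)) : Nat :=
  (Z.filter (fun z => !decide (z ∈ v))).length

lemma pv_unvis_add_lt (Z : List (Int × Int)) (v : PySem.Set (Int × Int)) (n : Int × Int)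
    (hnZ : n ∈ Z) (hnv : n ∉ v) : pvUnvis Z (PySem.Set.add v n) + 1 ≤ pvUnvis Z v := by
  refine pv_sublist_lt (List.monotone_filter_right _ ?_) n ?_ ?_
  · intro z hz
    simp only [Bool.not_eq_true', decide_eq_false_iff_not, PySem.Set.mem_add] at hz ⊢
    intro hzv
    exact hz (Or.inl hzv)
  · simp [List.mem_filter, hnZ, hnv]
  · simp [List.mem_filter, PySem.Set.mem_add]

lemma pv_foldl_opt_some {α β : Type} (f : Option β → α → Option β) (l : List α) (s : β)
    (hsome : ∀ s x, f (some s) x = some s) : l.foldl f (some s) = some s := by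
  induction l with
  | nil => rfl
  | cons a l ih => rw [List.foldl_cons, hsome]; exact ih

lemma pv_foldl_opt_none {α β : Type} (f : Option β → α → Option β) (g : α → Option β)
    (l : List α) (hsome : ∀ s x, f (some s) x = some s) (hnone : ∀ x, f none x = g x) :
    l.foldl f none = (l.filterMap g).head? := by
  induction l with
  | nil => rfl
  | cons a l ih =>
    rw [List.foldl_cons, List.filterMap_cons, hnone]
    cases hx : g a with
    | none => simpa [hx] using ih
    | some b => simpa [hx] using pv_foldl_opt_some f l b hsome

lemma pv_head?_filterMap_head? {α β : Type} (l : List α) (h : α → List β) :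
    (l.filterMap (fun x => (h x).head?)).head? = (l.flatMap h).head? := by
  induction l with
  | nil => rfl
  | cons a l ih => cases hx : h a <;> simp [hx, ih]

-- findStart returns the head of the row-major zero list
lemma pv_findStart_eq (maze : List (List Int)) (rows cols : Int) :
    pvFindStart maze rows cols = (pvZeros maze rows cols).head? := by
  unfold pvFindStart pvZeros
  have hin : ∀ r : Int,
      ((PySem.List.pyRange 0 cols 1).foldl (fun st2 c =>
        match st2 with | some _ => st2 | none => if pvAt maze r c == 0 then some (r, c) else none) none)
      = ((PySem.List.pyRange 0 cols 1).filterMap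
          (fun c => if pvAt maze r c == 0 then some (r, c) else none)).head? := by
    intro r
    exact pv_foldl_opt_none _ _ _ (fun _ _ => rfl) (fun _ => rfl)
  simp only [hin]
  exact (pv_foldl_opt_none _ _ _ (fun _ _ => rfl) (fun _ => rfl)).trans
    (pv_head?_filterMap_head? _ _)

-- ---- BFS (port A) characterisation ----

lemma pv_closed_reach (maze : List (List Int)) (rows cols : Int) (z0 : Int × Int)
    (v : PySem.Set (Int × Int)) (hz0 : z0 ∈ v)
    (hcl : ∀ p ∈ v, ∀ n, pvStepRel maze rows cols p n → n ∈ v) :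
    ∀ x, pvReach maze rows cols z0 x → x ∈ v := by
  intro x hx
  induction hx with
  | refl => exact hz0
  | tail _ hbc ih => exact hcl _ ih _ hbc

-- what one pop's direction fold does to (visited, queue)
lemma pv_visitDir_fold (maze : List (List Int)) (rows cols : Int) (rc : Int × Int) :
    ∀ (ds : List (Int × Int)) (v : PySem.Set (Int × Int)) (q : List (Int × Int)),
      (∀ x ∈ v, x ∈ (ds.foldl (pvVisitDir maze rows cols rc) (v, q)).1) ∧
      (∀ x ∈ (ds.foldl (pvVisitDir maze rows cols rc) (v, q)).1,
        x ∈ v ∨ (x ∈ pvZeros maze rows cols ∧ ∃ d ∈ ds, x = (rc.1 + d.1, rc.2 + d.2))) ∧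
      (∀ y ∈ q, y ∈ (ds.foldl (pvVisitDir maze rows cols rc) (v, q)).2) ∧
      (∀ y ∈ (ds.foldl (pvVisitDir maze rows cols rc) (v, q)).2,
        y ∈ q ∨ ((y ∈ (ds.foldl (pvVisitDir maze rows cols rc) (v, q)).1) ∧ y ∉ v)) ∧
      (∀ x ∈ (ds.foldl (pvVisitDir maze rows cols rc) (v, q)).1, x ∉ v →
        x ∈ (ds.foldl (pvVisitDir maze rows cols rc) (v, q)).2) ∧
      ((ds.foldl (pvVisitDir maze rows cols rc) (v, q)).2.length +
        pvUnvis (pvZeros maze rows cols) (ds.foldl (pvVisitDir maze rows cols rc) (v, q)).1 ≤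
        q.length + pvUnvis (pvZeros maze rows cols) v) ∧
      (∀ d ∈ ds, (rc.1 + d.1, rc.2 + d.2) ∈ pvZeros maze rows cols →
        (rc.1 + d.1, rc.2 + d.2) ∈ (ds.foldl (pvVisitDir maze rows cols rc) (v, q)).1) := by
  intro ds
  induction ds with
  | nil =>
    intro v q
    refine ⟨fun x hx => hx, fun x hx => Or.inl hx, fun y hy => hy,
      fun y hy => Or.inl hy, fun x hx hxv => absurd hx hxv, le_refl _, ?_⟩
    intro d hd
    cases hd
  | cons d ds ih =>
    intro v q
    simp only [List.foldl_cons]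
    by_cases hcond : 0 ≤ rc.1 + d.1 ∧ rc.1 + d.1 < rows ∧ 0 ≤ rc.2 + d.2 ∧ rc.2 + d.2 < cols ∧
        (pvAt maze (rc.1 + d.1) (rc.2 + d.2) == 0) = true ∧ (rc.1 + d.1, rc.2 + d.2) ∉ v
    · have hstep : pvVisitDir maze rows cols rc (v, q) d =
          (PySem.Set.add v (rc.1 + d.1, rc.2 + d.2), q ++ [(rc.1 + d.1, rc.2 + d.2)]) := by
        unfold pvVisitDir
        rw [if_pos hcond]
      rw [hstep]
      have hnZ : (rc.1 + d.1, rc.2 + d.2) ∈ pvZeros maze rows cols := by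
        refine (pv_mem_zeros maze rows cols _).mpr ?_
        exact ⟨⟨hcond.1, hcond.2.1⟩, ⟨hcond.2.2.1, hcond.2.2.2.1⟩,
          by simpa using hcond.2.2.2.2.1⟩
      obtain ⟨ih1, ih2, ih3, ih4, ih5, ih6, ih7⟩ :=
        ih (PySem.Set.add v (rc.1 + d.1, rc.2 + d.2)) (q ++ [(rc.1 + d.1, rc.2 + d.2)])
      have hmemn : (rc.1 + d.1, rc.2 + d.2) ∈ PySem.Set.add v (rc.1 + d.1, rc.2 + d.2) :=
        (PySem.Set.mem_add _ _ _).mpr (Or.inr rfl)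
      refine ⟨?_, ?_, ?_, ?_, ?_, ?_, ?_⟩
      · intro x hx
        exact ih1 x ((PySem.Set.mem_add _ _ _).mpr (Or.inl hx))
      · intro x hx
        rcases ih2 x hx with h | h
        · rcases (PySem.Set.mem_add _ _ _).mp h with h' | h'
          · exact Or.inl h'
          · exact Or.inr ⟨h' ▸ hnZ, d, List.mem_cons_self, h'⟩
        · exact Or.inr ⟨h.1, h.2.imp (fun d' hd' => ⟨List.mem_cons_of_mem _ hd'.1, hd'.2⟩)⟩
      · intro y hy
        exact ih3 y (List.mem_append_left _ hy)
      · intro y hy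
        rcases ih4 y hy with h | h
        · rcases List.mem_append.mp h with h' | h'
          · exact Or.inl h'
          · rcases List.mem_singleton.mp h' with rfl
            exact Or.inr ⟨ih1 _ hmemn, hcond.2.2.2.2.2⟩
        · refine Or.inr ⟨h.1, ?_⟩
          intro hyv
          exact h.2 ((PySem.Set.mem_add _ _ _).mpr (Or.inl hyv))
      · intro x hx hxv
        by_cases hxn : x ∈ PySem.Set.add v (rc.1 + d.1, rc.2 + d.2)
        · rcases (PySem.Set.mem_add _ _ _).mp hxn with h' | h'
          · exact absurd h' hxv
          · exact ih3 x (by rw [h']; exact List.mem_append_right _ (List.mem_singleton_self _))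
        · exact ih5 x hx hxn
      · have hlt := pv_unvis_add_lt (pvZeros maze rows cols) v (rc.1 + d.1, rc.2 + d.2)
          hnZ hcond.2.2.2.2.2
        have := ih6
        rw [List.length_append, List.length_singleton] at this
        omega
      · intro d' hd' hZ'
        rcases List.mem_cons.mp hd' with rfl | hd'
        · exact ih1 _ hmemn
        · exact ih7 d' hd' hZ'
    · have hstep : pvVisitDir maze rows cols rc (v, q) d = (v, q) := by
        unfold pvVisitDir
        rw [if_neg hcond]
      rw [hstep]
      obtain ⟨ih1, ih2, ih3, ih4, ih5, ih6, ih7⟩ := ih v q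
      refine ⟨ih1, ?_, ih3, ih4, ih5, ih6, ?_⟩
      · intro x hx
        rcases ih2 x hx with h | h
        · exact Or.inl h
        · exact Or.inr ⟨h.1, h.2.imp (fun d' hd' => ⟨List.mem_cons_of_mem _ hd'.1, hd'.2⟩)⟩
      · intro d' hd' hZ'
        rcases List.mem_cons.mp hd' with heq | hd'
        · subst heq
          have hin : (rc.1 + d'.1, rc.2 + d'.2) ∈ v := by
            by_contra hnv
            obtain ⟨⟨h1, h2⟩, ⟨h3, h4⟩, h5⟩ := (pv_mem_zeros maze rows cols _).mp hZ'
            exact hcond ⟨h1, h2, h3, h4, by simpa using h5, hnv⟩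
          exact ih1 _ hin
        · exact ih7 d' hd' hZ'

lemma pv_bfs_mem (maze : List (List Int)) (rows cols : Int) (z0 : Int × Int) :
    ∀ (fuel : Nat) (visited : PySem.Set (Int × Int)) (queue : List (Int × Int)),
      z0 ∈ visited →
      (∀ y ∈ queue, y ∈ visited) →
      (∀ v ∈ visited, pvReach maze rows cols z0 v) →
      (∀ v ∈ visited, v ∉ queue → ∀ n, pvStepRel maze rows cols v n → n ∈ visited) →
      queue.length + pvUnvis (pvZeros maze rows cols) visited ≤ fuel →
      ∀ x, x ∈ pvBFS maze rows cols fuel visited queue ↔ pvReach maze rows cols z0 x := by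
  intro fuel
  induction fuel with
  | zero =>
    intro visited queue hz0 hq hr hcl hfuel x
    cases queue with
    | nil =>
      rw [show pvBFS maze rows cols 0 visited [] = visited from rfl]
      exact ⟨fun h => hr x h,
        pv_closed_reach maze rows cols z0 visited hz0
          (fun p hp n hn => hcl p hp (List.not_mem_nil) n hn) x⟩
    | cons a l => simp only [List.length_cons] at hfuel; omega
  | succ fuel ih =>
    intro visited queue hz0 hq hr hcl hfuel x
    cases queue with
    | nil =>
      rw [show pvBFS maze rows cols (fuel + 1) visited [] = visited from rfl]
      exact ⟨fun h => hr x h,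
        pv_closed_reach maze rows cols z0 visited hz0
          (fun p hp n hn => hcl p hp (List.not_mem_nil) n hn) x⟩
    | cons rc rest =>
      obtain ⟨f1, f2, f3, f4, f5, f6, f7⟩ :=
        pv_visitDir_fold maze rows cols rc pvDirs visited rest
      rw [show pvBFS maze rows cols (fuel + 1) visited (rc :: rest)
            = pvBFS maze rows cols fuel
                (pvDirs.foldl (pvVisitDir maze rows cols rc) (visited, rest)).1
                (pvDirs.foldl (pvVisitDir maze rows cols rc) (visited, rest)).2 from rfl]
      refine ih _ _ (f1 _ hz0) ?_ ?_ ?_ ?_ x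
      · intro y hy
        rcases f4 y hy with h | h
        · exact f1 _ (hq y (List.mem_cons_of_mem _ h))
        · exact h.1
      · intro p hp
        rcases f2 p hp with h | h
        · exact hr p h
        · obtain ⟨hZ, d, hd, rfl⟩ := h
          exact Relation.ReflTransGen.tail (hr rc (hq rc List.mem_cons_self)) ⟨hZ, d, hd, rfl⟩
      · intro p hp hpq n hn
        by_cases hpv : p ∈ visited
        · by_cases hprc : p = rc
          · subst hprc
            obtain ⟨hnZ, d, hd, rfl⟩ := hn
            exact f7 d hd hnZ
          · have hpqold : p ∉ rc :: rest := by
              intro hmem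
              rcases List.mem_cons.mp hmem with h | h
              · exact hprc h
              · exact hpq (f3 p h)
            exact f1 _ (hcl p hpv hpqold n hn)
        · exact absurd (f5 p hp hpv) hpq
      · simp only [List.length_cons] at hfuel
        omega

-- ---- saturation (port B) characterisation ----

lemma pv_grow_prefix (zset v : PySem.Set (Int × Int)) :
    ∃ ext, pvGrow zset v = v ++ ext :=
  ⟨_, PySem.Set.update_eq_append_filter v _⟩

lemma pv_grow_sound (maze : List (List Int)) (rows cols : Int)
    (v : PySem.Set (Int × Int)) (x : Int × Int)
    (hx : x ∈ pvGrow (PySem.Set.ofList (pvZeros maze rows cols)) v) :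
    x ∈ v ∨ ∃ p ∈ v, pvStepRel maze rows cols p x := by
  rcases (PySem.Set.mem_union v _ x).mp hx with h | h
  · exact Or.inl h
  · right
    obtain ⟨p, hp, hx2⟩ := List.mem_flatMap.mp h
    obtain ⟨d, hd, hif⟩ := List.mem_filterMap.mp hx2
    split at hif
    · rename_i hcont
      cases hif
      refine ⟨p, hp, ?_, d, hd, rfl⟩
      exact (PySem.Set.mem_ofList _ _).mp ((PySem.Set.contains_iff _ _).mp hcont)
    · cases hif

lemma pv_grow_fixed_closed (maze : List (List Int)) (rows cols : Int)
    (v : PySem.Set (Int × Int))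
    (hfix : pvGrow (PySem.Set.ofList (pvZeros maze rows cols)) v = v)
    (p : Int × Int) (hp : p ∈ v) (x : Int × Int)
    (hs : pvStepRel maze rows cols p x) : x ∈ v := by
  obtain ⟨hxZ, d, hd, rfl⟩ := hs
  rw [← hfix]
  refine (PySem.Set.mem_union _ _ _).mpr (Or.inr ?_)
  refine List.mem_flatMap.mpr ⟨p, hp, List.mem_filterMap.mpr ⟨d, hd, ?_⟩⟩
  rw [if_pos]
  exact (PySem.Set.contains_iff _ _).mpr ((PySem.Set.mem_ofList _ _).mpr hxZ)

lemma pv_foldl_range_iterate {α : Type} (f : α → α) (n : Nat) (a : α) :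
    (List.range n).foldl (fun v _ => f v) a = f^[n] a := by
  induction n with
  | zero => rfl
  | succ n ih => rw [List.range_succ, List.foldl_append, ih, List.foldl_cons, List.foldl_nil,
      Function.iterate_succ_apply']

lemma pv_iterate_fixed {α : Type} (f : α → α) (a : α) (h : f a = a) (m : Nat) :
    f^[m] a = a := by
  induction m with
  | zero => rfl
  | succ m ih => rw [Function.iterate_succ_apply', ih, h]

lemma pv_iterate_sound (maze : List (List Int)) (rows cols : Int) (z0 : Int × Int) :
    ∀ (k : Nat) (x : Int × Int),
      x ∈ (pvGrow (PySem.Set.ofList (pvZeros maze rows cols)))^[k]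
            (PySem.Set.add PySem.Set.empty z0) →
      pvReach maze rows cols z0 x := by
  intro k
  induction k with
  | zero =>
    intro x hx
    rcases (PySem.Set.mem_add _ _ _).mp hx with h | rfl
    · cases h
    · exact Relation.ReflTransGen.refl
  | succ k ih =>
    intro x hx
    rw [Function.iterate_succ_apply'] at hx
    rcases pv_grow_sound maze rows cols _ x hx with h | ⟨p, hp, hstep⟩
    · exact ih x h
    · exact Relation.ReflTransGen.tail (ih p hp) hstep

lemma pv_iterate_nodup_subset (maze : List (List Int)) (rows cols : Int) (z0 : Int × Int)
    (hz0Z : z0 ∈ pvZeros maze rows cols) :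
    ∀ (k : Nat),
      ((pvGrow (PySem.Set.ofList (pvZeros maze rows cols)))^[k]
          (PySem.Set.add PySem.Set.empty z0)).Nodup ∧
      (∀ x ∈ (pvGrow (PySem.Set.ofList (pvZeros maze rows cols)))^[k]
          (PySem.Set.add PySem.Set.empty z0), x ∈ pvZeros maze rows cols) := by
  intro k
  induction k with
  | zero =>
    refine ⟨PySem.Set.nodup_add _ _ List.nodup_nil, ?_⟩
    intro x hx
    rcases (PySem.Set.mem_add _ _ _).mp hx with h | rfl
    · cases h
    · exact hz0Z
  | succ k ih =>
    rw [Function.iterate_succ_apply']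
    refine ⟨PySem.Set.nodup_union _ _ ih.1, ?_⟩
    intro x hx
    rcases pv_grow_sound maze rows cols _ x hx with h | ⟨p, _, hstep⟩
    · exact ih.2 x h
    · exact hstep.1

lemma pv_iterate_start_mem (zset : PySem.Set (Int × Int)) (z0 : Int × Int) :
    ∀ (k : Nat), z0 ∈ (pvGrow zset)^[k] (PySem.Set.add PySem.Set.empty z0) := by
  intro k
  induction k with
  | zero => exact (PySem.Set.mem_add _ _ _).mpr (Or.inr rfl)
  | succ k ih =>
    rw [Function.iterate_succ_apply']
    obtain ⟨ext, hext⟩ := pv_grow_prefix zset _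
    rw [hext]
    exact List.mem_append_left _ ih

lemma pv_fixed_of_iterate {α : Type} (f : List α → List α) (v0 : List α) (n : Nat)
    (hpref : ∀ v, ∃ ext, f v = v ++ ext)
    (hlen0 : 1 ≤ v0.length)
    (hbound : (f^[n] v0).length ≤ n) :
    f (f^[n] v0) = f^[n] v0 := by
  have key : ∀ k : Nat, (∃ j ≤ k, f (f^[j] v0) = f^[j] v0) ∨ k + 1 ≤ (f^[k] v0).length := by
    intro k
    induction k with
    | zero => right; simpa using hlen0
    | succ k ih =>
      rcases ih with ⟨j, hj, hfix⟩ | hlen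
      · exact Or.inl ⟨j, hj.trans (Nat.le_succ k), hfix⟩
      · by_cases hfix : f (f^[k] v0) = f^[k] v0
        · exact Or.inl ⟨k, Nat.le_succ k, hfix⟩
        · right
          obtain ⟨ext, hext⟩ := hpref (f^[k] v0)
          have hextne : ext ≠ [] := by
            intro h
            rw [h, List.append_nil] at hext
            exact hfix hext
          rw [Function.iterate_succ_apply', hext, List.length_append]
          have : 1 ≤ ext.length := List.length_pos_iff.mpr hextne
          omega
  rcases key n with ⟨j, hj, hfix⟩ | hlen
  · have heq : f^[n] v0 = f^[j] v0 := by
      have hn : n = (n - j) + j := by omega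
      rw [hn, Function.iterate_add_apply]
      exact pv_iterate_fixed f (f^[j] v0) hfix (n - j)
    rw [heq, hfix]
  · omega

lemma pv_sat_fixed (maze : List (List Int)) (rows cols : Int) (z0 : Int × Int)
    (hz0Z : z0 ∈ pvZeros maze rows cols) :
    pvGrow (PySem.Set.ofList (pvZeros maze rows cols))
        ((pvGrow (PySem.Set.ofList (pvZeros maze rows cols)))^[(pvZeros maze rows cols).length]
          (PySem.Set.add PySem.Set.empty z0))
      = (pvGrow (PySem.Set.ofList (pvZeros maze rows cols)))^[(pvZeros maze rows cols).length]
          (PySem.Set.add PySem.Set.empty z0) := by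
  refine pv_fixed_of_iterate _ _ _ (pv_grow_prefix _) ?_ ?_
  · rw [PySem.Set.add_eq_ite, if_neg (by exact List.not_mem_nil)]
    simp
  · have hns := pv_iterate_nodup_subset maze rows cols z0 hz0Z (pvZeros maze rows cols).length
    exact pv_nodup_length_le _ _ hns.1 (fun x hx => hns.2 x hx)

lemma pv_sat_mem (maze : List (List Int)) (rows cols : Int) (z0 : Int × Int)
    (hz0Z : z0 ∈ pvZeros maze rows cols) (x : Int × Int) :
    x ∈ (pvGrow (PySem.Set.ofList (pvZeros maze rows cols)))^[(pvZeros maze rows cols).length]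
          (PySem.Set.add PySem.Set.empty z0)
      ↔ pvReach maze rows cols z0 x := by
  constructor
  · exact pv_iterate_sound maze rows cols z0 _ x
  · refine pv_closed_reach maze rows cols z0 _
      (pv_iterate_start_mem _ z0 _) ?_ x
    intro p hp n hn
    exact pv_grow_fixed_closed maze rows cols _
      (pv_sat_fixed maze rows cols z0 hz0Z) p hp n hn

-- ===== VERDICT (by name: the statement is the Claim_ definition above) =====
theorem isfully0connected_spec : Claim_equal_isfully0connected := by
  unfold Claim_equal_isfully0connected Spec_isfully0connected
  intro maze _ _
  simp only [isfully0connected, isfully0connected_alt]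
  rw [pv_findStart_eq]
  cases hZ : pvZeros maze (maze.length : Int) ((PySem.List.pyGetD maze 0 []).length : Int) with
  | nil => rfl
  | cons z0 zs =>
    simp only [List.head?_cons]
    have hz0Z : z0 ∈ pvZeros maze (maze.length : Int) ((PySem.List.pyGetD maze 0 []).length : Int) := by
      rw [hZ]; exact List.mem_cons_self
    -- characterise A's visited set
    have hv0 : PySem.Set.add PySem.Set.empty z0 = [z0] := by
      rw [PySem.Set.add_eq_ite, if_neg (by exact List.not_mem_nil)]; rfl
    have hA := pv_bfs_mem maze (maze.length : Int) ((PySem.List.pyGetD maze 0 []).length : Int)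
      z0 ((maze.length : Int) * ((PySem.List.pyGetD maze 0 []).length : Int)).toNat
      (PySem.Set.add PySem.Set.empty z0) [z0]
      (by rw [hv0]; exact List.mem_singleton_self _)
      (by intro y hy; rw [hv0]; exact hy)
      (by
        intro v hv
        rw [hv0] at hv
        rcases List.mem_singleton.mp hv with rfl
        exact Relation.ReflTransGen.refl)
      (by
        intro v hv hnq
        rw [hv0] at hv
        exact absurd (hv0 ▸ hv) hnq)
      (by
        have h1 := pv_unvis_add_lt
          (pvZeros maze (maze.length : Int) ((PySem.List.pyGetD maze 0 []).length : Int))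
          PySem.Set.empty z0 hz0Z List.not_mem_nil
        have h2 : pvUnvis
            (pvZeros maze (maze.length : Int) ((PySem.List.pyGetD maze 0 []).length : Int))
            PySem.Set.empty
            = (pvZeros maze (maze.length : Int) ((PySem.List.pyGetD maze 0 []).length : Int)).length := by
          unfold pvUnvis
          rw [List.filter_eq_self.mpr]
          intro a _
          simp
        have h3 := pv_zeros_length_le maze (maze.length : Int)
          ((PySem.List.pyGetD maze 0 []).length : Int) (by positivity) (by positivity)
        simp only [List.length_singleton]
        omega)
    -- characterise B's visited set
    have hB := pv_sat_mem maze (maze.length : Int) ((PySem.List.pyGetD maze 0 []).length : Int) z0 hz0Z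
    rw [hZ] at hB
    rw [pv_foldl_range_iterate]
    apply Bool.coe_iff_coe.mp
    rw [PySem.Set.issubset_iff]
    simp only [List.all_eq_true, PySem.List.mem_pyRange_one]
    constructor
    · intro h p hp
      have hpZ : p ∈ pvZeros maze (maze.length : Int) ((PySem.List.pyGetD maze 0 []).length : Int) := by
        rw [hZ]
        exact (PySem.Set.mem_ofList _ _).mp (hZ ▸ hp)
      obtain ⟨⟨h1, h2⟩, ⟨h3, h4⟩, h5⟩ := (pv_mem_zeros _ _ _ _).mp hpZ
      have := h p.1 ⟨h1, h2⟩ p.2 ⟨h3, h4⟩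
      rw [Bool.not_eq_true', Bool.and_eq_false_iff] at this
      rcases this with hc | hc
      · rw [beq_eq_false_iff_ne] at hc; exact absurd h5 hc
      · rw [Bool.not_eq_false', PySem.Set.contains_iff] at hc
        simp only [Prod.mk.eta] at hc
        exact (hB p).mpr ((hA p).mp hc)
    · intro h r hr c hc
      rw [Bool.not_eq_true', Bool.and_eq_false_iff]
      by_cases hz : pvAt maze r c = 0
      · right
        have hpZ : (r, c) ∈ pvZeros maze (maze.length : Int)
            ((PySem.List.pyGetD maze 0 []).length : Int) :=
          (pv_mem_zeros _ _ _ _).mpr ⟨hr, hc, hz⟩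
        have hmem : (r, c) ∈ PySem.Set.ofList (z0 :: zs) :=
          (PySem.Set.mem_ofList _ _).mpr (hZ ▸ hpZ)
        have := (hA (r, c)).mpr ((hB (r, c)).mp (h (r, c) hmem))
        rw [Bool.not_eq_false', PySem.Set.contains_iff]
        exact this
      · left
        rw [beq_eq_false_iff_ne]
        exact hz
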